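-- pv_equiv track=rewrite | github.com/Igor961-bot/SoundAnalysis1 | audio_features.py | merge_short_middle_runs
-- ===== SOURCE A (Python) =====
-- def merge_short_middle_runs(labels: list[str], max_run_length: int) -> list[str]:
--     if not labels or max_run_length <= 0:
--         return labels
--
--     cleaned_labels = labels[:]
--     start_index = 0
--
--     while start_index < len(cleaned_labels):
--         end_index = start_index + 1
--         while end_index < len(cleaned_labels) and cleaned_labels[end_index] == cleaned_labels[start_index]:
--             end_index += 1
--
--         run_length = end_index - start_index
--         left_label = cleaned_labels[start_index - 1] if start_index > 0 else None
--         right_label = cleaned_labels[end_index] if end_index < len(cleaned_labels) else None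
--
--         if run_length <= max_run_length and left_label is not None and left_label == right_label:
--             for index in range(start_index, end_index):
--                 cleaned_labels[index] = left_label
--
--         start_index = end_index
--
--     return cleaned_labels
-- ===== SOURCE B (Python) =====
-- from itertools import groupby
--
--
-- def merge_short_middle_runs(labels: list[str], max_run_length: int) -> list[str]:
--     if not labels or max_run_length <= 0:
--         return labels
--
--     runs = [(label, sum(1 for _ in group)) for label, group in groupby(labels)]
--     out: list[str] = []
--     prev_effective = None
--     for i, (label, count) in enumerate(runs):
--         right = runs[i + 1][0] if i + 1 < len(runs) else None
--         if count <= max_run_length and prev_effective is not None and prev_effective == right: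
--             out.extend([prev_effective] * count)
--         else:
--             out.extend([label] * count)
--             prev_effective = label
--     return out
-- ===== Notes on version B (the rewrite author's own statement) =====
-- stated objective: alternative
-- what changed: B replaces A's in-place index-mutation scan over a copied list with a run-length encoding (groupby) followed by a single pass over the runs that tracks the previous run's effective label and re-expands the runs.
import Mathlib
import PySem

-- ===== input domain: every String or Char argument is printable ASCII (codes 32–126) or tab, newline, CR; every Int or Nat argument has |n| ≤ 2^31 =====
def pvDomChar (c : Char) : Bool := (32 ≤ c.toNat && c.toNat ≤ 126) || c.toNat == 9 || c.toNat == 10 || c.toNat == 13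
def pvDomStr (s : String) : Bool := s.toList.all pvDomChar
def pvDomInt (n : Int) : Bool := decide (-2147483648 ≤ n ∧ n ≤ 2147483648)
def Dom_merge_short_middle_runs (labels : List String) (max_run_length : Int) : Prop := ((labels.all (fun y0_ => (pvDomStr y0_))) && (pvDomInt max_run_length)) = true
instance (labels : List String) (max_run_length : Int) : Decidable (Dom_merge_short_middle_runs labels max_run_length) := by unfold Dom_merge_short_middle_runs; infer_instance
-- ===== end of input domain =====

-- B re-implements A's in-place mutation scan as run-length encoding + one pass over
-- the runs tracking the previous run's effective label (objective: alternative).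

-- ===== PORT A =====
-- inner while loop: advance end_index while cleaned_labels[end_index] == cleaned_labels[start_index]
def pvRunEnd (cleaned : List String) (x : String) (e : Nat) : Nat :=
  if _h : e < cleaned.length ∧ cleaned.getD e "" = x then pvRunEnd cleaned x (e + 1) else e
termination_by cleaned.length - e

-- left_label = cleaned_labels[start_index - 1] if start_index > 0 else None
def pvLeft (cleaned : List String) (start : Nat) : Option String :=
  if 0 < start then some (cleaned.getD (start - 1) "") else none

-- right_label = cleaned_labels[end_index] if end_index < len(cleaned_labels) else None
def pvRight (cleaned : List String) (e : Nat) : Option String :=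
  if e < cleaned.length then some (cleaned.getD e "") else none

-- for index in range(start_index, end_index): cleaned_labels[index] = left_label
def pvSetRange (cleaned : List String) (a b : Nat) (v : String) : List String :=
  (List.range' a (b - a)).foldl (fun acc i => acc.set i v) cleaned

theorem pvSetRange_length (cleaned : List String) (a b : Nat) (v : String) :
    (pvSetRange cleaned a b v).length = cleaned.length := by
  unfold pvSetRange
  generalize List.range' a (b - a) = is
  induction is generalizing cleaned with
  | nil => rfl
  | cons i is ih => simpa [List.foldl] using ih (cleaned.set i v)

theorem pvRunEnd_ge (cleaned : List String) (x : String) (e : Nat) : e ≤ pvRunEnd cleaned x e := by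
  unfold pvRunEnd
  split
  · exact le_trans (Nat.le_succ e) (pvRunEnd_ge cleaned x (e + 1))
  · exact le_refl e
termination_by cleaned.length - e

-- outer while loop of A
def pvALoop (maxLen : Int) (cleaned : List String) (start : Nat) : List String :=
  if h : start < cleaned.length then
    if ((pvRunEnd cleaned (cleaned.getD start "") (start + 1) : Int) - (start : Int) ≤ maxLen ∧
        (pvLeft cleaned start).isSome ∧
        pvLeft cleaned start = pvRight cleaned (pvRunEnd cleaned (cleaned.getD start "") (start + 1))) then
      pvALoop maxLen
        (pvSetRange cleaned start (pvRunEnd cleaned (cleaned.getD start "") (start + 1))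
          ((pvLeft cleaned start).getD ""))
        (pvRunEnd cleaned (cleaned.getD start "") (start + 1))
    else
      pvALoop maxLen cleaned (pvRunEnd cleaned (cleaned.getD start "") (start + 1))
  else cleaned
termination_by cleaned.length - start
decreasing_by
  · have h1 := pvRunEnd_ge cleaned (cleaned.getD start "") (start + 1)
    rw [pvSetRange_length]
    omega
  · have h1 := pvRunEnd_ge cleaned (cleaned.getD start "") (start + 1)
    omega

def merge_short_middle_runs (labels : List String) (max_run_length : Int) : List String :=
  if labels = [] ∨ max_run_length ≤ 0 then labels
  else pvALoop max_run_length labels 0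

-- ===== PORT B =====
-- run-length encoding (itertools.groupby)
def pvToRuns : List String → List (String × Nat)
  | [] => []
  | x :: xs =>
    match pvToRuns xs with
    | [] => [(x, 1)]
    | (y, c) :: rest => if x = y then (y, c + 1) :: rest else (x, 1) :: (y, c) :: rest

-- one pass over the runs, tracking the previous run's EFFECTIVE label
def pvProcessRuns (maxLen : Int) (prev : Option String) : List (String × Nat) → List String
  | [] => []
  | (lab, c) :: rest =>
    if ((c : Int) ≤ maxLen ∧ prev.isSome ∧ prev = rest.head?.map Prod.fst) then
      List.replicate c (prev.getD "") ++ pvProcessRuns maxLen prev rest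
    else
      List.replicate c lab ++ pvProcessRuns maxLen (some lab) rest

def merge_short_middle_runs_alt (labels : List String) (max_run_length : Int) : List String :=
  if labels = [] ∨ max_run_length ≤ 0 then labels
  else pvProcessRuns max_run_length none (pvToRuns labels)

-- ===== PRECONDITION & SPEC =====
def Spec_merge_short_middle_runs (labels : List String) (max_run_length : Int) (out : List String) : Prop := out = merge_short_middle_runs_alt labels max_run_length
instance (labels : List String) (max_run_length : Int) (out : List String) : Decidable (Spec_merge_short_middle_runs labels max_run_length out) := by unfold Spec_merge_short_middle_runs; infer_instance

-- ===== CLAIM (what is proved, stated in full; the proofs are below) =====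
def Claim_equal_merge_short_middle_runs : Prop := ∀ (labels : List String) (max_run_length : Int), Dom_merge_short_middle_runs labels max_run_length → Spec_merge_short_middle_runs labels max_run_length (merge_short_middle_runs labels max_run_length)

-- ===== LEMMAS AND PROOFS =====

-- every nonempty list decomposes into a maximal first run and a remainder
theorem pv_run_decomp (s : List String) :
    s = [] ∨ ∃ x c rest, 1 ≤ c ∧ s = List.replicate c x ++ rest ∧ rest.head? ≠ some x := by
  induction s with
  | nil => exact Or.inl rfl
  | cons x xs ih =>
    right
    rcases ih with h | ⟨y, c, rest, hc, hxs, hh⟩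
    · exact ⟨x, 1, [], le_refl 1, by simp [h], by simp⟩
    · by_cases hxy : x = y
      · exact ⟨y, c + 1, rest, by omega, by simp [hxs, hxy, List.replicate_succ], hh⟩
      · refine ⟨x, 1, xs, le_refl 1, by simp, ?_⟩
        subst hxs
        cases c with
        | zero => omega
        | succ c => simp [List.replicate_succ]; exact fun h => hxy h.symm

theorem pvToRuns_head (l : List String) : (pvToRuns l).head?.map Prod.fst = l.head? := by
  cases l with
  | nil => rfl
  | cons x xs =>
    simp only [pvToRuns]
    cases pvToRuns xs with
    | nil => simp
    | cons p rest =>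
      obtain ⟨y, c⟩ := p
      by_cases h : x = y <;> simp [h]

theorem pvToRuns_run (x : String) (c : Nat) (rest : List String) (hc : 1 ≤ c)
    (hh : rest.head? ≠ some x) :
    pvToRuns (List.replicate c x ++ rest) = (x, c) :: pvToRuns rest := by
  induction c with
  | zero => omega
  | succ c ih =>
    cases c with
    | zero =>
      simp only [List.replicate_succ, List.replicate_zero, List.nil_append, List.cons_append,
        pvToRuns]
      have hhd : (pvToRuns rest).head?.map Prod.fst = rest.head? := pvToRuns_head rest
      cases hr : pvToRuns rest with
      | nil => simp
      | cons p r =>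
        obtain ⟨y, k⟩ := p
        have hy : rest.head? = some y := by rw [← hhd, hr]; rfl
        have hxy : ¬ x = y := fun h => hh (by rw [hy, h])
        simp [hxy]
    | succ c' =>
      have ih' := ih (by omega)
      simp only [List.replicate_succ, List.cons_append, pvToRuns] at ih' ⊢
      rw [ih']
      simp

theorem pv_getD_append (pre l : List String) (d : String) :
    (pre ++ l).getD pre.length d = l.headD d := by
  induction pre with
  | nil => cases l <;> simp [List.getD]
  | cons a p ih => simpa using ih

theorem pv_left_eq (pre s : List String) :
    pvLeft (pre ++ s) pre.length = pre.getLast? := by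
  rcases List.eq_nil_or_concat pre with h | ⟨q, a, h⟩
  · simp [h, pvLeft]
  · subst h
    simp only [List.concat_eq_append, pvLeft]
    rw [if_pos (by simp)]
    have h1 : (q ++ [a]).length = q.length + 1 := by simp
    rw [h1]
    have h2 : (q ++ [a]) ++ s = q ++ (a :: s) := by simp
    simp only [Nat.add_sub_cancel, h2]
    rw [pv_getD_append]
    simp

theorem pv_right_eq (pre : List String) (x : String) (c : Nat) (rest : List String) :
    pvRight (pre ++ (List.replicate c x ++ rest)) (pre.length + c) = rest.head? := by
  unfold pvRight
  have hassoc : pre ++ (List.replicate c x ++ rest) = (pre ++ List.replicate c x) ++ rest := by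
    simp
  have hlen : (pre ++ List.replicate c x).length = pre.length + c := by simp
  cases rest with
  | nil =>
    have hn : ¬ (pre.length + c < (pre ++ (List.replicate c x ++ ([] : List String))).length) := by
      simp
    rw [if_neg hn]
    rfl
  | cons b t =>
    have hp : pre.length + c < (pre ++ (List.replicate c x ++ b :: t)).length := by
      simp
    rw [if_pos hp, hassoc, ← hlen, pv_getD_append]
    rfl

theorem pv_foldl_set (v : String) :
    ∀ (c : Nat) (pre mid rest : List String), mid.length = c →
    List.foldl (fun acc i => acc.set i v) (pre ++ (mid ++ rest)) (List.range' pre.length c) =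
      pre ++ (List.replicate c v ++ rest) := by
  intro c
  induction c with
  | zero =>
    intro pre mid rest hm
    have : mid = [] := List.eq_nil_of_length_eq_zero hm
    subst this
    simp
  | succ c ih =>
    intro pre mid rest hm
    cases mid with
    | nil => simp at hm
    | cons m mid' =>
      rw [List.range'_succ]
      simp only [List.foldl]
      have hset : (pre ++ (m :: mid' ++ rest)).set pre.length v = (pre ++ [v]) ++ (mid' ++ rest) := by
        have : pre ++ (m :: mid' ++ rest) = pre ++ m :: (mid' ++ rest) := by simp
        rw [this]
        have h2 := List.set_append_right (s := pre) (t := m :: (mid' ++ rest)) pre.length v (le_refl _)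
        simp only [Nat.sub_self, List.set_cons_zero] at h2
        rw [h2]
        simp
      rw [hset]
      have hlen : (pre ++ [v]).length = pre.length + 1 := by simp
      have := ih (pre ++ [v]) mid' rest (by simpa using hm)
      rw [hlen] at this
      rw [this]
      simp [List.replicate_succ]

theorem pvSetRange_spec (v x : String) (c : Nat) (pre rest : List String) :
    pvSetRange (pre ++ (List.replicate c x ++ rest)) pre.length (pre.length + c) v =
      pre ++ (List.replicate c v ++ rest) := by
  unfold pvSetRange
  have h : pre.length + c - pre.length = c := by omega
  rw [h]
  exact pv_foldl_set v c pre (List.replicate c x) rest (by simp)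

theorem pvRunEnd_run (x : String) (c : Nat) :
    ∀ (pre rest : List String), rest.head? ≠ some x →
    pvRunEnd (pre ++ (List.replicate c x ++ rest)) x pre.length = pre.length + c := by
  induction c with
  | zero =>
    intro pre rest hh
    unfold pvRunEnd
    rw [dif_neg]
    · omega
    rintro ⟨hlt, heq⟩
    simp only [List.replicate_zero, List.nil_append] at hlt heq
    rw [pv_getD_append] at heq
    cases rest with
    | nil => simp at hlt
    | cons b t => exact hh (by simpa using congrArg some heq)
  | succ c ih =>
    intro pre rest hh
    unfold pvRunEnd
    rw [dif_pos]
    · have hthis := ih (pre ++ [x]) rest hh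
      have h1 : (pre ++ [x]) ++ (List.replicate c x ++ rest) =
          pre ++ (List.replicate (c + 1) x ++ rest) := by simp [List.replicate_succ]
      have h2 : (pre ++ [x]).length = pre.length + 1 := by simp
      rw [h1, h2] at hthis
      rw [hthis]; omega
    · constructor
      · simp
      · have h3 : pre ++ (List.replicate (c + 1) x ++ rest) =
            pre ++ (x :: (List.replicate c x ++ rest)) := by simp [List.replicate_succ]
        rw [h3, pv_getD_append]
        rfl

theorem pv_ne_nil_of_pos {c : Nat} (hc : 1 ≤ c) (x : String) :
    List.replicate c x ≠ ([] : List String) := by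
  cases c with
  | zero => omega
  | succ c => simp [List.replicate_succ]

theorem pv_getLast_append_run (pre : List String) (x : String) (c : Nat) (hc : 1 ≤ c) :
    (pre ++ List.replicate c x).getLast? = some x := by
  rw [List.getLast?_append_of_ne_nil _ (pv_ne_nil_of_pos hc x)]
  cases c with
  | zero => omega
  | succ c =>
    induction c with
    | zero => rfl
    | succ k ih => simpa [List.replicate_succ, List.getLast?] using ih

-- main invariant: A's outer loop from position |pre| equals B's run pass with
-- prev = last (effective) label of the processed prefix
theorem pv_main (maxLen : Int) :
    ∀ (n : Nat) (s pre : List String), s.length ≤ n →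
    pvALoop maxLen (pre ++ s) pre.length = pre ++ pvProcessRuns maxLen pre.getLast? (pvToRuns s) := by
  intro n
  induction n with
  | zero =>
    intro s pre hn
    have hs : s = [] := List.eq_nil_of_length_eq_zero (by omega)
    subst hs
    rw [pvALoop]
    rw [dif_neg (by simp)]
    simp [pvToRuns, pvProcessRuns]
  | succ n ih =>
    intro s pre hn
    rcases pv_run_decomp s with hs | ⟨x, c, rest, hc, hs, hh⟩
    · subst hs
      rw [pvALoop]
      rw [dif_neg (by simp)]
      simp [pvToRuns, pvProcessRuns]
    · subst hs
      have hlenrest : rest.length ≤ n := by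
        simp only [List.length_append, List.length_replicate] at hn
        omega
      rw [pvALoop]
      rw [dif_pos (by simp; omega)]
      -- the label at start is x
      have hx : (pre ++ (List.replicate c x ++ rest)).getD pre.length "" = x := by
        rw [pv_getD_append]
        cases c with
        | zero => omega
        | succ c => simp [List.replicate_succ]
      have he : pvRunEnd (pre ++ (List.replicate c x ++ rest)) x (pre.length + 1) =
          pre.length + c := by
        have hthis := pvRunEnd_run x (c - 1) (pre ++ [x]) rest hh
        have h1 : (pre ++ [x]) ++ (List.replicate (c - 1) x ++ rest) =
            pre ++ (List.replicate c x ++ rest) := by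
          cases c with
          | zero => omega
          | succ c => simp [List.replicate_succ]
        have h2 : (pre ++ [x]).length = pre.length + 1 := by simp
        rw [h1, h2] at hthis
        rw [hthis]; omega
      rw [hx, he, pv_left_eq pre (List.replicate c x ++ rest), pv_right_eq pre x c rest]
      rw [pvToRuns_run x c rest hc hh]
      simp only [pvProcessRuns, pvToRuns_head]
      have hrl : ((pre.length + c : Nat) : Int) - (pre.length : Int) = (c : Int) := by
        push_cast; ring
      rw [hrl]
      by_cases hcond : ((c : Int) ≤ maxLen ∧ pre.getLast?.isSome ∧ pre.getLast? = rest.head?)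
      · obtain ⟨hle, hsome, hpr⟩ := hcond
        obtain ⟨a, ha⟩ := Option.isSome_iff_exists.mp hsome
        rw [if_pos ⟨hle, hsome, hpr⟩, if_pos ⟨hle, hsome, hpr⟩]
        rw [ha]
        simp only [Option.getD_some]
        rw [pvSetRange_spec a x c pre rest]
        have hre : pre ++ (List.replicate c a ++ rest) = (pre ++ List.replicate c a) ++ rest := by
          simp
        have hlen3 : pre.length + c = (pre ++ List.replicate c a).length := by simp
        rw [hre, hlen3, ih rest (pre ++ List.replicate c a) hlenrest]
        rw [pv_getLast_append_run pre a c hc]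
        rw [← ha]
        simp
      · rw [if_neg hcond, if_neg hcond]
        have hre : pre ++ (List.replicate c x ++ rest) = (pre ++ List.replicate c x) ++ rest := by
          simp
        have hlen3 : pre.length + c = (pre ++ List.replicate c x).length := by simp
        rw [hre, hlen3, ih rest (pre ++ List.replicate c x) hlenrest]
        rw [pv_getLast_append_run pre x c hc]
        simp

-- ===== VERDICT (by name: the statement is the Claim_ definition above) =====
theorem merge_short_middle_runs_spec : Claim_equal_merge_short_middle_runs := by
  intro labels max_run_length _
  unfold Spec_merge_short_middle_runs merge_short_middle_runs merge_short_middle_runs_alt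
  by_cases h : labels = [] ∨ max_run_length ≤ 0
  · rw [if_pos h, if_pos h]
  · rw [if_neg h, if_neg h]
    have := pv_main max_run_length labels.length labels [] (le_refl _)
    simpa using this
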